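-- pv_equiv track=rewrite | github.com/anamillen/UGA-INF101 | Exercices autoévalués Caseine/Semaine 45/Jeux de mots.py | double_consonne
-- ===== SOURCE A (Python) =====
-- def est_voyelle(ch):
--     """Verifie si un char est bien une voyelle"""
--     voyelles = ['a','e','o','i','u','y']
--     return ch in voyelles
--
-- def double_consonne(mot):
--     """Prend en argument un mot et a deux valeurs de retour:
--     - un booléen valant True si le mot contient une double consonne (deux fois la même consonne à la suite),
--     et dans ce cas la deuxième valeur de retour est la consonne qui est doublée ;
--     s'il n'y a pas de consonne doublée, la fonction renvoie False et None."""
--     res = False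
--     consonne_doublee = None
--     long = len(mot)
--     for i in range(long):
--         if not est_voyelle(mot[i]):
--             if i<long-1 and mot[i]==mot[i+1]:
--                 res = True
--                 consonne_doublee = mot[i]
--     return res, consonne_doublee
-- ===== SOURCE B (Python) =====
-- def double_consonne(mot):
--     for i in range(len(mot) - 2, -1, -1):
--         if mot[i] not in "aeoiuy" and mot[i] == mot[i + 1]:
--             return True, mot[i]
--     return False, None
-- ===== Notes on version B (the rewrite author's own statement) =====
-- stated objective: simpler
-- what changed: Backward scan from the end that returns immediately at the first (i.e. rightmost) doubled consonant, instead of A's full forward scan that keeps overwriting the last match.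
import Mathlib
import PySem

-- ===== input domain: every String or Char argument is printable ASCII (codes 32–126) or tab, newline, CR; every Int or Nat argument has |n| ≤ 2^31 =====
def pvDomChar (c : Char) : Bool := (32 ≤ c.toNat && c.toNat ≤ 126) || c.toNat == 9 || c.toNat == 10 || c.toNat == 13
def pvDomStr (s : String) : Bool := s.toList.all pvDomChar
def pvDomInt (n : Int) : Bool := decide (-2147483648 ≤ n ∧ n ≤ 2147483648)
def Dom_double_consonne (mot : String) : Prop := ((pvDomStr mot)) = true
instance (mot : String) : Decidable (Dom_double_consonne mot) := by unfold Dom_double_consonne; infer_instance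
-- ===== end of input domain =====

-- B replaces A's forward full scan (which keeps overwriting the last doubled consonant found)
-- by a backward scan that returns at the first, i.e. rightmost, doubled consonant (objective: simpler).


-- ===== PORT A =====
-- est_voyelle: membership of the char in the explicit vowel list
def est_voyelle (ch : Char) : Bool := ['a','e','o','i','u','y'].contains ch

-- one iteration of A's for-loop body at index i, over state (res, consonne_doublee)
def aStep (l : List Char) (st : Bool × Option String) (i : Nat) : Bool × Option String :=
  match l[i]? with
  | some c =>
      if ¬ est_voyelle c then
        if i < l.length - 1 ∧ l[i+1]? = some c then (true, some (String.mk [c])) else st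
      else st
  | none => st

def double_consonne (mot : String) : Bool × Option String :=
  (List.range mot.toList.length).foldl (aStep mot.toList) (false, none)

-- ===== PORT B =====
-- B's backward loop: bGo l k scans i = k-1, k-2, …, 0 and returns at the first match
def bGo (l : List Char) : Nat → Bool × Option String
  | 0 => (false, none)
  | i + 1 =>
      match l[i]?, l[i+1]? with
      | some c, some d =>
          if ¬ ("aeoiuy".toList.contains c) ∧ c = d then (true, some (String.mk [c]))
          else bGo l i
      | _, _ => bGo l i

def double_consonne_alt (mot : String) : Bool × Option String :=
  bGo mot.toList (mot.toList.length - 1)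

-- ===== PRECONDITION & SPEC =====
def Spec_double_consonne (mot : String) (out : Bool × Option String) : Prop := out = double_consonne_alt mot
instance (mot : String) (out : Bool × Option String) : Decidable (Spec_double_consonne mot out) := by unfold Spec_double_consonne; infer_instance

-- ===== CLAIM (what is proved, stated in full; the proofs are below) =====
def Claim_equal_double_consonne : Prop := ∀ (mot : String), Dom_double_consonne mot → Spec_double_consonne mot (double_consonne mot)

-- ===== LEMMAS AND PROOFS =====

theorem voyelle_eq (c : Char) : est_voyelle c = ("aeoiuy".toList.contains c) := by
  have h : "aeoiuy".toList = ['a','e','o','i','u','y'] := by decide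
  rw [est_voyelle, h]

-- A's fold over the first n indices equals B's backward scan up to min n (len-1)
theorem fold_eq_bGo (l : List Char) (n : Nat) :
    (List.range n).foldl (aStep l) (false, none) = bGo l (min n (l.length - 1)) := by
  induction n with
  | zero => simp [bGo]
  | succ n ih =>
      rw [List.range_succ, List.foldl_append, ih]
      simp only [List.foldl_cons, List.foldl_nil]
      by_cases h : n < l.length - 1
      · have hmn : min n (l.length - 1) = n := by omega
        have hmn1 : min (n + 1) (l.length - 1) = n + 1 := by omega
        rw [hmn, hmn1]
        have h1 : n < l.length := by omega
        have h2 : n + 1 < l.length := by omega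
        have hc : l[n]? = some l[n] := List.getElem?_eq_getElem h1
        have hd : l[n+1]? = some l[n+1] := List.getElem?_eq_getElem h2
        simp only [aStep, bGo, hc, hd, voyelle_eq, Option.some.injEq]
        by_cases hv : ("aeoiuy".toList.contains l[n]) = true
        · rw [if_neg (by simp at hv ⊢; tauto), if_neg (by simp at hv ⊢; tauto)]
        · rw [if_pos hv]
          by_cases he : l[n] = l[n+1]
          · rw [if_pos ⟨h, he.symm⟩, if_pos ⟨hv, he⟩]
          · rw [if_neg (fun hx => he hx.2.symm), if_neg (fun hx => he hx.2)]
      · have hmn : min n (l.length - 1) = l.length - 1 := by omega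
        have hmn1 : min (n + 1) (l.length - 1) = l.length - 1 := by omega
        rw [hmn, hmn1]
        unfold aStep
        cases hc : l[n]? with
        | none => rfl
        | some c =>
            have : n < l.length := (List.getElem?_eq_some_iff.mp hc).1
            simp [show ¬ (n < l.length - 1 ∧ l[n+1]? = some c) from fun ⟨h', _⟩ => h h']

-- ===== VERDICT (by name: the statement is the Claim_ definition above) =====
theorem double_consonne_spec : Claim_equal_double_consonne := by
  intro mot _
  unfold Spec_double_consonne double_consonne double_consonne_alt
  rw [fold_eq_bGo]
  congr 1
  omega
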